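-- pv_equiv track=rewrite | github.com/nalalou/agent-kappa | src/agent_kappa/metrics.py | _contingency
-- ===== SOURCE A (Python) =====
-- def _contingency(y1: list[int], y2: list[int]) -> tuple[int, int, int, int]:
--     """
--     2×2 contingency table for two binary classifiers.
--     Returns (a, b, c, d) where:
--         a = both correct
--         b = y1 correct, y2 incorrect
--         c = y1 incorrect, y2 correct
--         d = both incorrect
--     """
--     a = b = c = d = 0
--     for v1, v2 in zip(y1, y2):
--         if v1 == 1 and v2 == 1:
--             a += 1
--         elif v1 == 1 and v2 == 0:
--             b += 1
--         elif v1 == 0 and v2 == 1: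
--             c += 1
--         else:
--             d += 1
--     return a, b, c, d
-- ===== SOURCE B (Python) =====
-- def _contingency(y1: list[int], y2: list[int]) -> tuple[int, int, int, int]:
--     n = min(len(y1), len(y2))
--     ones1 = {i for i in range(n) if y1[i] == 1}
--     ones2 = {i for i in range(n) if y2[i] == 1}
--     zeros1 = {i for i in range(n) if y1[i] == 0}
--     zeros2 = {i for i in range(n) if y2[i] == 0}
--     a = len(ones1 & ones2)
--     b = len(ones1 & zeros2)
--     c = len(zeros1 & ones2)
--     return a, b, c, n - a - b - c
-- ===== Notes on version B (the rewrite author's own statement) =====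
-- stated objective: alternative
-- what changed: Instead of one pass over zipped pairs with a four-way branch, B builds index sets (indices where each list is 1 or 0) and obtains a, b, c as cardinalities of set intersections, deriving the catch-all d as n minus the other three cells.
import Mathlib
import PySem

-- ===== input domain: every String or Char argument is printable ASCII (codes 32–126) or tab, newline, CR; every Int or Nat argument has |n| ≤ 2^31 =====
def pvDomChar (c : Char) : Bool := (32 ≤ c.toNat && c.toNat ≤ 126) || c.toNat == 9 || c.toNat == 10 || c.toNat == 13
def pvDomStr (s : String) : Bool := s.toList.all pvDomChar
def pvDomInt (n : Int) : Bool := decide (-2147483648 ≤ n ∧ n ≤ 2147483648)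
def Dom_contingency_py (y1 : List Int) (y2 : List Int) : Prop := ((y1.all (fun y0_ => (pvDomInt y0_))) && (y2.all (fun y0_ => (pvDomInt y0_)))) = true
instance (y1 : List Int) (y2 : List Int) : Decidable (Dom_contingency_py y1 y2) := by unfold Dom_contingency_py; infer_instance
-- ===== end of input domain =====

-- B replaces A's four-way branching loop over zipped pairs by index sets (indices where
-- each list holds 1, resp. 0); a, b, c are cardinalities of set intersections and the
-- catch-all cell d is n minus the other three (alternative decomposition, same cost).

-- ===== PORT A =====
def contingency_py (y1 : List Int) (y2 : List Int) : Int × Int × Int × Int :=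
  (y1.zip y2).foldl
    (fun (s : Int × Int × Int × Int) (p : Int × Int) =>
      if p.1 = 1 ∧ p.2 = 1 then (s.1 + 1, s.2.1, s.2.2.1, s.2.2.2)
      else if p.1 = 1 ∧ p.2 = 0 then (s.1, s.2.1 + 1, s.2.2.1, s.2.2.2)
      else if p.1 = 0 ∧ p.2 = 1 then (s.1, s.2.1, s.2.2.1 + 1, s.2.2.2)
      else (s.1, s.2.1, s.2.2.1, s.2.2.2 + 1))
    (0, 0, 0, 0)

-- ===== PORT B =====
-- y1[i] is only read for i < n ≤ len(y1), so List.getD is exact here.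
def contingency_py_alt (y1 : List Int) (y2 : List Int) : Int × Int × Int × Int :=
  let n := min y1.length y2.length
  let ones1 := PySem.Set.ofList ((List.range n).filter (fun i => y1.getD i 0 == 1))
  let ones2 := PySem.Set.ofList ((List.range n).filter (fun i => y2.getD i 0 == 1))
  let zeros1 := PySem.Set.ofList ((List.range n).filter (fun i => y1.getD i 0 == 0))
  let zeros2 := PySem.Set.ofList ((List.range n).filter (fun i => y2.getD i 0 == 0))
  let a := PySem.Set.len (PySem.Set.inter ones1 ones2)
  let b := PySem.Set.len (PySem.Set.inter ones1 zeros2)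
  let c := PySem.Set.len (PySem.Set.inter zeros1 ones2)
  (a, b, c, (n : Int) - a - b - c)

-- ===== PRECONDITION & SPEC =====
def Spec_contingency_py (y1 : List Int) (y2 : List Int) (out : Int × Int × Int × Int) : Prop := out = contingency_py_alt y1 y2
instance (y1 : List Int) (y2 : List Int) (out : Int × Int × Int × Int) : Decidable (Spec_contingency_py y1 y2 out) := by unfold Spec_contingency_py; infer_instance

-- ===== CLAIM (what is proved, stated in full; the proofs are below) =====
def Claim_equal_contingency_py : Prop := ∀ (y1 : List Int) (y2 : List Int), Dom_contingency_py y1 y2 → Spec_contingency_py y1 y2 (contingency_py y1 y2)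

-- ===== LEMMAS AND PROOFS =====

/-- A's loop, from an arbitrary state, adds the per-cell pair counts;
the else branch collects everything the first three conditions miss. -/
lemma contingency_foldl_eq (zs : List (Int × Int)) :
    ∀ a b c d : Int,
      zs.foldl
        (fun (s : Int × Int × Int × Int) (p : Int × Int) =>
          if p.1 = 1 ∧ p.2 = 1 then (s.1 + 1, s.2.1, s.2.2.1, s.2.2.2)
          else if p.1 = 1 ∧ p.2 = 0 then (s.1, s.2.1 + 1, s.2.2.1, s.2.2.2)
          else if p.1 = 0 ∧ p.2 = 1 then (s.1, s.2.1, s.2.2.1 + 1, s.2.2.2)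
          else (s.1, s.2.1, s.2.2.1, s.2.2.2 + 1))
        (a, b, c, d)
      = (a + zs.count (1, 1), b + zs.count (1, 0), c + zs.count (0, 1),
         d + ((zs.length : Int) - zs.count (1, 1) - zs.count (1, 0) - zs.count (0, 1))) := by
  induction zs with
  | nil => intro a b c d; simp
  | cons p zs ih =>
    intro a b c d
    by_cases h1 : p.1 = 1 ∧ p.2 = 1
    · have hp : p = (1, 1) := Prod.ext h1.1 h1.2
      subst hp
      simp only [List.foldl_cons]
      norm_num
      rw [ih]
      simp
      omega
    · by_cases h2 : p.1 = 1 ∧ p.2 = 0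
      · have hp : p = (1, 0) := Prod.ext h2.1 h2.2
        subst hp
        simp only [List.foldl_cons]
        norm_num
        rw [ih]
        simp
        omega
      · by_cases h3 : p.1 = 0 ∧ p.2 = 1
        · have hp : p = (0, 1) := Prod.ext h3.1 h3.2
          subst hp
          simp only [List.foldl_cons]
          norm_num
          rw [ih]
          simp
          omega
        · have hne1 : p ≠ (1, 1) := by rintro rfl; exact h1 (And.intro rfl rfl)
          have hne2 : p ≠ (1, 0) := by rintro rfl; exact h2 (And.intro rfl rfl)
          have hne3 : p ≠ (0, 1) := by rintro rfl; exact h3 (And.intro rfl rfl)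
          simp only [List.foldl_cons]
          rw [if_neg h1, if_neg h2, if_neg h3, ih]
          simp [hne1, hne2, hne3]
          omega

/-- The intersection of two filtered index sets over range n counts indices
satisfying both predicates. -/
lemma len_inter_filter_range (n : Nat) (p q : Nat → Bool) :
    PySem.Set.len (PySem.Set.inter
        (PySem.Set.ofList ((List.range n).filter p))
        (PySem.Set.ofList ((List.range n).filter q)))
      = ((List.range n).countP (fun i => p i && q i) : Int) := by
  rw [PySem.Set.ofList_eq_self_of_nodup _ ((List.nodup_range).filter p),
      PySem.Set.ofList_eq_self_of_nodup _ ((List.nodup_range).filter q)]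
  unfold PySem.Set.inter PySem.Set.len
  rw [List.filter_filter, ← List.countP_eq_length_filter]
  norm_cast
  apply List.countP_congr
  intro i hi
  simp [List.mem_filter, List.mem_range.mp hi, Bool.and_comm]

/-- Counting indices below min-length on a pairwise predicate equals counting
zipped pairs. -/
lemma countP_range_zip (y1 y2 : List Int) (P : Int → Int → Bool) :
    (List.range (min y1.length y2.length)).countP
        (fun i => P (y1.getD i 0) (y2.getD i 0))
      = (y1.zip y2).countP (fun v => P v.1 v.2) := by
  induction y1 generalizing y2 with
  | nil => simp
  | cons x t ih =>
    cases y2 with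
    | nil => simp
    | cons y u =>
      have h : min (t.length + 1) (u.length + 1) = min t.length u.length + 1 := by omega
      simp only [List.length_cons, h, List.range_succ_eq_map, List.countP_cons,
        List.countP_map, List.zip_cons_cons, Function.comp_def,
        List.getD_cons_succ, List.getD_cons_zero]
      rw [ih u]

-- ===== VERDICT (by name: the statement is the Claim_ definition above) =====
theorem contingency_py_spec : Claim_equal_contingency_py := by
  intro y1 y2 _
  unfold Spec_contingency_py contingency_py contingency_py_alt
  rw [contingency_foldl_eq]
  simp only [len_inter_filter_range]
  rw [countP_range_zip y1 y2 (fun a b => a == 1 && b == 1),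
      countP_range_zip y1 y2 (fun a b => a == 1 && b == 0),
      countP_range_zip y1 y2 (fun a b => a == 0 && b == 1)]
  have hcount : ∀ (v1 v2 : Int),
      (y1.zip y2).countP (fun v => v.1 == v1 && v.2 == v2) = (y1.zip y2).count (v1, v2) := by
    intro v1 v2
    unfold List.count
    apply List.countP_congr
    intro v _
    constructor
    · intro h
      simp_all [Prod.ext_iff]
    · intro h
      simp_all [Prod.ext_iff]
  simp only [hcount]
  have hlen : (y1.zip y2).length = min y1.length y2.length := List.length_zip
  simp [hlen]
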